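-- pv_equiv track=rewrite | github.com/djccnt15/maths | linalg.py | mat_toeplitz
-- ===== SOURCE A (Python) =====
-- def mat_toeplitz(a, b):
--     n1 = len(a)
--     n2 = len(b)
--     T = []
--
--     for i in range(n1):
--         row = []
--         for j in range(n2):
--             if i >= j:
--                 row.append(a[i-j])
--             else:
--                 row.append(b[j-i])
--         T.append(row)
--
--     return T
-- ===== SOURCE B (Python) =====
-- def mat_toeplitz(a, b):
--     # diagonal band: v[d + len(b) - 1] holds the Toeplitz value for offset d = i - j
--     n2 = len(b)
--     v = b[1:][::-1] + list(a)
--     return [v[i:i + n2][::-1] for i in range(len(a))]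
-- ===== Notes on version B (the rewrite author's own statement) =====
-- stated objective: simpler
-- what changed: B builds the diagonal band vector reversed(b[1:])+a once and reads each row as a reversed slice of it, replacing A's nested loop with a per-element if/else by a single comprehension over slices.
import Mathlib
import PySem

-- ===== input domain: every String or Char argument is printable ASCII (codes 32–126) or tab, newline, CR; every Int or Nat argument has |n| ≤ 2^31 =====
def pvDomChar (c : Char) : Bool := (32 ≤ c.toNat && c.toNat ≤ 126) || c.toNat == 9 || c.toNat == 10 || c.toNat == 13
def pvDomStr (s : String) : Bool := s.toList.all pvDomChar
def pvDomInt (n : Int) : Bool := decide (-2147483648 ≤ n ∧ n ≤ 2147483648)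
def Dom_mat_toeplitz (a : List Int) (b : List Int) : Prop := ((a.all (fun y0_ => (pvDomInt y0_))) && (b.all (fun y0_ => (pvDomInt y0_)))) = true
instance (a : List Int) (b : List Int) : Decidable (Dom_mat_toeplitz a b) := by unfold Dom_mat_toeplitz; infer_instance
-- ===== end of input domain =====

-- B builds the diagonal band vector reversed(b[1:]) + a once and reads each row as a
-- reversed slice of it (simpler: no per-element if/else); same return value as A.

-- ===== PORT A =====
def mat_toeplitz (a : List Int) (b : List Int) : List (List Int) :=
  (PySem.List.pyRange 0 a.length 1).foldl (fun T i =>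
    T ++ [(PySem.List.pyRange 0 b.length 1).foldl (fun row j =>
      row ++ [if j ≤ i then PySem.List.pyGetD a (i - j) 0
              else PySem.List.pyGetD b (j - i) 0]) []]) []

-- ===== PORT B =====
def mat_toeplitz_alt (a : List Int) (b : List Int) : List (List Int) :=
  let n2 : Int := b.length
  let v : List Int := (PySem.List.slice b (some 1) none).reverse ++ a
  (PySem.List.pyRange 0 a.length 1).map
    (fun i => (PySem.List.slice v (some i) (some (i + n2))).reverse)

-- ===== PRECONDITION & SPEC =====
def Spec_mat_toeplitz (a : List Int) (b : List Int) (out : List (List Int)) : Prop := out = mat_toeplitz_alt a b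
instance (a : List Int) (b : List Int) (out : List (List Int)) : Decidable (Spec_mat_toeplitz a b out) := by unfold Spec_mat_toeplitz; infer_instance

-- ===== CLAIM (what is proved, stated in full; the proofs are below) =====
def Claim_equal_mat_toeplitz : Prop := ∀ (a : List Int) (b : List Int), Dom_mat_toeplitz a b → Spec_mat_toeplitz a b (mat_toeplitz a b)

-- ===== LEMMAS AND PROOFS =====

-- A's value, written as a double map over List.range
def tpRow (a b : List Int) (i : Nat) : List Int :=
  (List.range b.length).map (fun (j : Nat) =>
    if ((j : Int)) ≤ ((i : Int)) then PySem.List.pyGetD a ((i : Int) - (j : Int)) 0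
    else PySem.List.pyGetD b ((j : Int) - (i : Int)) 0)

lemma matA_eq (a b : List Int) :
    mat_toeplitz a b = (List.range a.length).map (tpRow a b) := by
  unfold mat_toeplitz tpRow
  rw [PySem.List.pyRange_zero_natCast, PySem.List.pyRange_zero_natCast]
  simp only [List.foldl_map, PySem.List.foldl_append_singleton_eq_map, List.nil_append]

lemma band_eq (b : List Int) : PySem.List.slice b (some 1) none = b.drop 1 := by
  have : (1 : Int) = ((1 : Nat) : Int) := by norm_num
  rw [this, PySem.List.slice_from_natCast]

lemma matB_eq (a b : List Int) :
    mat_toeplitz_alt a b = (List.range a.length).map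
      (fun i => ((((b.drop 1).reverse ++ a).drop i).take b.length).reverse) := by
  unfold mat_toeplitz_alt
  rw [band_eq, PySem.List.pyRange_zero_natCast]
  simp only [List.map_map]
  refine List.map_congr_left ?_
  intro i _
  simp only [Function.comp]
  rw [PySem.List.slice_natCast_add]

lemma row_eq (a b : List Int) (i : Nat) (hi : i < a.length) :
    ((((b.drop 1).reverse ++ a).drop i).take b.length).reverse = tpRow a b i := by
  have hb1 : (b.drop 1).reverse.length = b.length - 1 := by simp
  apply List.ext_getElem
  · simp [tpRow]; omega
  · intro k hk1 hk2
    have hkb : k < b.length := by simpa [tpRow] using hk2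
    simp only [List.getElem_reverse, List.getElem_take, List.getElem_drop,
      tpRow, List.getElem_map, List.getElem_range]
    have hm : i + ((List.take b.length (List.drop i ((b.drop 1).reverse ++ a))).length - 1 - k)
        = i + (b.length - 1 - k) := by simp; omega
    simp only [hm]
    by_cases hki : k ≤ i
    · -- element comes from the a-part of the band
      rw [if_pos (by exact_mod_cast hki)]
      rw [List.getElem_append_right (by omega : (b.drop 1).reverse.length ≤ i + (b.length - 1 - k))]
      have hik : i - k < a.length := by omega
      have hcast : (i : Int) - (k : Int) = ((i - k : Nat) : Int) := by omega
      rw [hcast, PySem.List.pyGetD_natCast]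
      rw [List.getD_eq_getElem?_getD, List.getElem?_eq_getElem hik]
      have hfin : i + (b.length - 1 - k) - (b.length - 1) = i - k := by omega
      simp [hfin]
    · -- element comes from the reversed b[1:] part
      rw [if_neg (by exact_mod_cast hki)]
      rw [List.getElem_append_left (by omega : i + (b.length - 1 - k) < (b.drop 1).reverse.length)]
      rw [List.getElem_reverse, List.getElem_drop]
      have hki' : k - i < b.length := by omega
      have hcast : (k : Int) - (i : Int) = ((k - i : Nat) : Int) := by omega
      rw [hcast, PySem.List.pyGetD_natCast]
      rw [List.getD_eq_getElem?_getD, List.getElem?_eq_getElem hki']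
      have hfin : 1 + (b.length - 1 - 1 - (i + (b.length - 1 - k))) = k - i := by omega
      simp [hfin]

-- ===== VERDICT (by name: the statement is the Claim_ definition above) =====
theorem mat_toeplitz_spec : Claim_equal_mat_toeplitz := by
  intro a b _
  unfold Spec_mat_toeplitz
  rw [matA_eq, matB_eq]
  refine List.map_congr_left ?_
  intro i hi
  exact (row_eq a b i (List.mem_range.mp hi)).symm
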